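-- pv_equiv track=rewrite | github.com/vberriche/poissoncoin | poissoncoin_keys.py | bd
-- ===== SOURCE A (Python) =====
-- base58 = "123456789ABCDEFGHJKLMNPQRSTUVWXYZabcdefghijkmnopqrstuvwxyz"
--
-- def bd(chaine):			# convert a base58 number into a decimal number
-- 	chaine=str(chaine)
-- 	s = 0
-- 	try:
-- 		for k in range(0,len(chaine)):
-- 			n = len(chaine)-k-1
-- 			s += base58.index(chaine[k])*(58**n)
-- 		return s
-- 	except:
-- 		return 0
-- ===== SOURCE B (Python) =====
-- base58 = "123456789ABCDEFGHJKLMNPQRSTUVWXYZabcdefghijkmnopqrstuvwxyz"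
-- _B58 = {c: i for i, c in enumerate(base58)}
--
-- def bd(chaine):
-- 	chaine = str(chaine)
-- 	s = 0
-- 	for c in chaine:
-- 		v = _B58.get(c)
-- 		if v is None:
-- 			return 0
-- 		s = s * 58 + v
-- 	return s
-- ===== Notes on version B (the rewrite author's own statement) =====
-- stated objective: faster
-- what changed: Replaced the positional sum (a str.index scan plus a fresh 58**n power per character) with a single left-to-right Horner pass using a precomputed char->value dict; invalid characters still yield 0 as in A's except branch.
import Mathlib
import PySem

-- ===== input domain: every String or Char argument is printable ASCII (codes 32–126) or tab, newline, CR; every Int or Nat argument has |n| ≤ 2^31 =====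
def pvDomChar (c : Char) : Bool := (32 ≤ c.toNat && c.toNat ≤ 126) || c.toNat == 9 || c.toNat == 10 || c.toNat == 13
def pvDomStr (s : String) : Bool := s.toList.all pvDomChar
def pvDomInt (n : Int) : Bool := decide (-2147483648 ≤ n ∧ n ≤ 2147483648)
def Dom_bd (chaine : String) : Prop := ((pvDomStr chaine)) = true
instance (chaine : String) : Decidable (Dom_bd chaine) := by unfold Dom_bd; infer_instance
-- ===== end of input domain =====

-- B replaces A's per-character str.index scan and 58**n exponentiation by one
-- Horner pass over the string with a precomputed char->value dictionary.

def base58L : List Char := "123456789ABCDEFGHJKLMNPQRSTUVWXYZabcdefghijkmnopqrstuvwxyz".toList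

-- ===== PORT A =====
-- one iteration of A's 'for k in range(0, len(chaine))' body; the Option state is
-- the pending try/except (none = an exception was raised, caught below as 0)
def bdStep (cs : List Char) (acc : Option Int) (k : Int) : Option Int :=
  acc.bind fun s =>
    (PySem.List.pyGet? cs k).bind fun ch =>          -- chaine[k]
      (PySem.List.index? base58L ch).map fun i =>    -- base58.index(...), ValueError = none
        s + Int.ofNat i * 58 ^ (((cs.length : Int) - k - 1).toNat)   -- n = len-k-1 ≥ 0 here

def bd (chaine : String) : Int :=
  ((PySem.List.pyRange 0 (chaine.toList.length : Int) 1).foldl (bdStep chaine.toList) (some 0)).getD 0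

-- ===== PORT B =====
-- _B58 = {c: i for i, c in enumerate(base58)}
def b58Table : PySem.Dict Char Int :=
  (PySem.List.enumerate base58L 0).foldl (fun d p => d.insert p.2 p.1) PySem.Dict.empty

-- the 'for c in chaine' Horner loop; none (a missing key) = 'return 0'
def bdHorner : List Char → Int → Int
  | [], s => s
  | c :: rest, s => (b58Table.get? c).elim 0 (fun v => bdHorner rest (s * 58 + v))

def bd_alt (chaine : String) : Int := bdHorner chaine.toList 0

-- ===== PRECONDITION & SPEC =====
def Spec_bd (chaine : String) (out : Int) : Prop := out = bd_alt chaine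
instance (chaine : String) (out : Int) : Decidable (Spec_bd chaine out) := by unfold Spec_bd; infer_instance

-- ===== CLAIM (what is proved, stated in full; the proofs are below) =====
def Claim_equal_bd : Prop := ∀ (chaine : String), Dom_bd chaine → Spec_bd chaine (bd chaine)

-- ===== LEMMAS AND PROOFS =====

-- value of a character, as both programs use it on valid characters
def idxI (c : Char) : Int := ((PySem.List.index? base58L c).getD 0 : Nat)

-- Horner valuation both sides compute on all-valid strings
def hv (cs : List Char) (s : Int) : Int := cs.foldl (fun s c => s * 58 + idxI c) s

-- A's per-index value, after the range/pyGet? plumbing is removed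
def tval (cs : List Char) (k : Nat) : Option Int :=
  (cs[k]?).bind fun ch => (PySem.List.index? base58L ch).map fun n => Int.ofNat n

def G (cs : List Char) (acc : Option Int) (k : Nat) : Option Int :=
  acc.bind fun s => (tval cs k).map fun i => s + i * 58 ^ (cs.length - 1 - k)

-- the table built by B's dict comprehension answers exactly str.index
lemma get?_mk_enum (l : List Char) (s : Int) (c : Char) :
    (PySem.Dict.mk ((PySem.List.enumerate l s).map (fun p => (p.2, p.1)))).get? c
      = (PySem.List.index? l c).map (fun n => (n : Int) + s) := by
  induction l generalizing s with
  | nil => simp [PySem.List.enumerate, PySem.List.index?_eq_idxOf?, List.idxOf?, PySem.Dict.get?]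
  | cons x xs ih =>
    rw [PySem.List.enumerate_cons]
    simp only [List.map_cons, PySem.Dict.get?_mk_cons]
    by_cases hx : x = c
    · subst hx
      rw [PySem.List.index?_cons_self]
      simp
    · rw [PySem.List.index?_cons_of_ne _ hx, ih (s + 1)]
      simp only [beq_iff_eq, if_neg hx]
      cases PySem.List.index? xs c <;> (simp; try ring)

lemma b58Table_get? (c : Char) :
    b58Table.get? c = (PySem.List.index? base58L c).map (fun n => Int.ofNat n) := by
  have hitems : b58Table.items =
      (PySem.List.enumerate base58L 0).map (fun p => (p.2, p.1)) := by
    have := PySem.Dict.items_foldl_insert_fresh (PySem.List.enumerate base58L 0)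
      (fun p => p.2) (fun p => p.1) (PySem.Dict.empty (κ := Char) (ν := Int))
      (by intro a _; simp) (by rw [PySem.List.map_snd_enumerate]; decide)
    simpa [b58Table, PySem.Dict.empty] using this
  have : b58Table = PySem.Dict.mk ((PySem.List.enumerate base58L 0).map (fun p => (p.2, p.1))) :=
    PySem.Dict.ext hitems
  rw [this, get?_mk_enum]
  cases h : PySem.List.index? base58L c <;> simp

-- a none state (a raised exception) is final in such a loop
lemma foldl_bind_none {A : Type} (g : A -> Int -> Option Int) (ks : List A) :
    ks.foldl (fun acc k => Option.bind acc (g k)) none = none := by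
  induction ks with
  | nil => rfl
  | cons k ks ih => simpa using ih

-- scaling: processing the same prefix with every power one higher multiplies the state by 58
lemma foldl_scale (t : Nat → Option Int) (p : Nat → Int) (ks : List Nat) :
    ∀ s : Int,
      ks.foldl (fun acc k => acc.bind fun s => (t k).map fun i => s + i * p k * 58) (some (s * 58))
        = (ks.foldl (fun acc k => acc.bind fun s => (t k).map fun i => s + i * p k) (some s)).map (· * 58) := by
  induction ks with
  | nil => intro s; simp
  | cons k ks ih =>
    intro s
    cases ht : t k with
    | none =>
      simp only [List.foldl_cons, Option.bind_some, ht, Option.map_none]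
      rw [foldl_bind_none (fun k s => (t k).map fun i => s + i * p k * 58) ks,
          foldl_bind_none (fun k s => (t k).map fun i => s + i * p k) ks]
      rfl
    | some i =>
      simp only [List.foldl_cons, Option.bind_some, ht, Option.map_some]
      have : s * 58 + i * p k * 58 = (s + i * p k) * 58 := by ring
      rw [this, ih (s + i * p k)]

-- A's indexed fold computes the Horner value on all-valid strings and none otherwise
lemma hv_append_singleton (cs : List Char) (c : Char) :
    hv (cs ++ [c]) 0 = hv cs 0 * 58 + idxI c := by
  simp [hv, List.foldl_append]

lemma foldl_G_eq (cs : List Char) :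
    (List.range cs.length).foldl (G cs) (some 0)
      = if ∀ c ∈ cs, c ∈ base58L then some (hv cs 0) else none := by
  induction cs using List.reverseRecOn with
  | nil => simp [hv]
  | append_singleton cs c ih =>
    have hlen : (cs ++ [c]).length = cs.length + 1 := by simp
    rw [hlen, List.range_succ, List.foldl_append]
    have hpref : (List.range cs.length).foldl (G (cs ++ [c])) (some 0)
        = ((List.range cs.length).foldl (G cs) (some 0)).map (· * 58) := by
      have hcong : (List.range cs.length).foldl (G (cs ++ [c])) (some 0)
          = (List.range cs.length).foldl
              (fun acc k => acc.bind fun s =>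
                (tval cs k).map fun i => s + i * 58 ^ (cs.length - 1 - k) * 58) (some 0) := by
        apply PySem.List.foldl_congr_mem
        intro acc k hk
        have hk' : k < cs.length := List.mem_range.mp hk
        have htv : tval (cs ++ [c]) k = tval cs k := by
          simp [tval, List.getElem?_append_left hk']
        have hpow : (58 : Int) ^ ((cs ++ [c]).length - 1 - k)
            = 58 ^ (cs.length - 1 - k) * 58 := by
          have : (cs ++ [c]).length - 1 - k = (cs.length - 1 - k) + 1 := by
            simp only [List.length_append, List.length_cons, List.length_nil]
            omega
          rw [this, pow_succ]
        simp only [G, htv, hpow]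
        cases acc with
        | none => rfl
        | some s =>
          cases tval cs k with
          | none => rfl
          | some i =>
            simp only [Option.bind_some, Option.map_some]
            congr 2
            ring
      rw [hcong]
      have := foldl_scale (tval cs) (fun k => 58 ^ (cs.length - 1 - k)) (List.range cs.length) 0
      simpa using this
    rw [hpref, ih]
    have htvl : tval (cs ++ [c]) cs.length
        = (PySem.List.index? base58L c).map (fun n => Int.ofNat n) := by
      simp only [tval, List.getElem?_concat_length, Option.bind_some]
    have hpow0 : (cs ++ [c]).length - 1 - cs.length = 0 := by simp
    by_cases hall : ∀ x ∈ cs, x ∈ base58L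
    · rw [if_pos hall]
      simp only [Option.map_some]
      by_cases hc : c ∈ base58L
      · obtain ⟨n, hn⟩ := Option.isSome_iff_exists.mp
          ((PySem.List.index?_isSome_iff base58L c).mpr hc)
        have hvalid : ∀ x ∈ cs ++ [c], x ∈ base58L := by
          intro x hx
          rcases List.mem_append.mp hx with hx | hx
          · exact hall x hx
          · simp at hx; subst hx; exact hc
        rw [if_pos hvalid]
        simp only [List.foldl_cons, List.foldl_nil, G, Option.bind_some, htvl, hn,
          Option.map_some, hpow0, pow_zero, mul_one]
        rw [hv_append_singleton]
        have hn' : List.idxOf? c base58L = some n := by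
          simpa [PySem.List.index?_eq_idxOf?] using hn
        simp [idxI, hn']
      · have hninval : ¬ ∀ x ∈ cs ++ [c], x ∈ base58L := by
          intro hall'
          exact hc (hall' c (by simp))
        rw [if_neg hninval]
        have hnone : List.idxOf? c base58L = none := by
          have := (PySem.List.index?_eq_none_iff base58L c).mpr hc
          simpa [PySem.List.index?_eq_idxOf?] using this
        simp [G, htvl, hnone]
    · rw [if_neg hall]
      have hninval : ¬ ∀ x ∈ cs ++ [c], x ∈ base58L := by
        intro hall'
        exact hall (fun x hx => hall' x (by simp [hx]))
      rw [if_neg hninval]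
      rfl

-- removing the pyRange/pyGet? plumbing from A's loop
lemma bd_eq_G (chaine : String) :
    bd chaine = ((List.range chaine.toList.length).foldl (G chaine.toList) (some 0)).getD 0 := by
  have hfun : (fun (acc : Option Int) (k : Nat) =>
      bdStep chaine.toList acc ((0 : Int) + (k : Int))) = G chaine.toList := by
    funext acc k
    simp only [bdStep, G, tval, zero_add, PySem.List.pyGet?_natCast]
    cases acc with
    | none => rfl
    | some s =>
      simp only [Option.bind_some]
      cases chaine.toList[k]? with
      | none => rfl
      | some ch =>
        simp only [Option.bind_some]
        have hpow : ((chaine.toList.length : Int) - (k : Int) - 1).toNat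
            = chaine.toList.length - 1 - k := by omega
        rw [hpow]
        cases PySem.List.index? base58L ch <;> rfl
  rw [bd, PySem.List.pyRange_one, List.foldl_map]
  simp only [Int.sub_zero, Int.toNat_natCast]
  rw [hfun]

-- B's loop in terms of the same valuation
lemma bdHorner_valid (cs : List Char) :
    ∀ s, (∀ c ∈ cs, c ∈ base58L) → bdHorner cs s = hv cs s := by
  induction cs with
  | nil => intro s _; rfl
  | cons c rest ih =>
    intro s h
    have hc : c ∈ base58L := h c (by simp)
    obtain ⟨n, hn⟩ := Option.isSome_iff_exists.mp ((PySem.List.index?_isSome_iff base58L c).mpr hc)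
    simp only [bdHorner]
    rw [b58Table_get?, hn]
    simp only [Option.map_some, Option.elim_some]
    rw [ih _ (fun x hx => h x (by simp [hx]))]
    have hn' : List.idxOf? c base58L = some n := by
      simpa [PySem.List.index?_eq_idxOf?] using hn
    simp [hv, idxI, hn']

lemma bdHorner_invalid (cs : List Char) :
    ∀ s, ¬ (∀ c ∈ cs, c ∈ base58L) → bdHorner cs s = 0 := by
  induction cs with
  | nil => intro s h; exact absurd (by simp) h
  | cons c rest ih =>
    intro s h
    simp only [bdHorner]
    rw [b58Table_get?]
    by_cases hc : c ∈ base58L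
    · obtain ⟨n, hn⟩ := Option.isSome_iff_exists.mp ((PySem.List.index?_isSome_iff base58L c).mpr hc)
      rw [hn]
      simp only [Option.map_some, Option.elim_some]
      exact ih _ (fun hall => h (by intro x hx; rcases List.mem_cons.mp hx with rfl | hx; exact hc; exact hall x hx))
    · have hnone : PySem.List.index? base58L c = none :=
        (PySem.List.index?_eq_none_iff base58L c).mpr hc
      rw [hnone]
      simp only [Option.map_none, Option.elim_none]

-- ===== VERDICT (by name: the statement is the Claim_ definition above) =====
theorem bd_spec : Claim_equal_bd := by
  intro chaine _
  show bd chaine = bd_alt chaine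
  rw [bd_eq_G, foldl_G_eq]
  by_cases h : ∀ c ∈ chaine.toList, c ∈ base58L
  · rw [if_pos h]
    show hv chaine.toList 0 = bd_alt chaine
    exact (bdHorner_valid _ 0 h).symm
  · rw [if_neg h]
    show (0 : Int) = bd_alt chaine
    exact (bdHorner_invalid _ 0 h).symm
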